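-- pv_equiv track=rewrite | github.com/fredalad/crypto | classify.py | classify_voting_from_logs
-- ===== SOURCE A (Python) =====
-- from typing import List, Dict, Any, DefaultDict, Optional
--
-- def classify_voting_from_logs(logs: List[Dict[str, Any]]) -> Optional[str]:
--     """
--     Voting classification (must run before approval heuristics):
--
--     - If ClaimBribe / ClaimFees present => CLAIM_REWARD (income)
--     - Else if Vote present => VOTE
--     - Else if Reset present => RESET_VOTE
--     """
--     has_vote = False
--     has_reset = False
--
--     for log in logs or []:
--         ev = (log.get("event") or "").lower()
--
--         # Income claims should win over vote/reset if present
--         if ev in {"claimbribe", "claimfees"}: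
--             return "CLAIM_REWARD"
--
--         if ev == "vote":
--             has_vote = True
--         elif ev == "reset":
--             has_reset = True
--
--     if has_vote:
--         return "VOTE"
--     if has_reset:
--         return "RESET_VOTE"
--     return None
-- ===== SOURCE B (Python) =====
-- RANK = {"claimbribe": 0, "claimfees": 0, "vote": 1, "reset": 2}
-- LABEL = {0: "CLAIM_REWARD", 1: "VOTE", 2: "RESET_VOTE"}
--
-- def classify_voting_from_logs(logs):
--     best = min((RANK.get((log.get("event") or "").lower(), 3) for log in logs or []),
--                default=3)
--     return LABEL.get(best)
-- ===== Notes on version B (the rewrite author's own statement) =====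
-- stated objective: alternative
-- what changed: Replaces A's flag accumulation and early-exit branch ladder by an arithmetic reduction: each log is scored with a priority rank from a table, the minimum rank is taken over the whole list, and the answer is a single table lookup on that minimum.
import Mathlib
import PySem

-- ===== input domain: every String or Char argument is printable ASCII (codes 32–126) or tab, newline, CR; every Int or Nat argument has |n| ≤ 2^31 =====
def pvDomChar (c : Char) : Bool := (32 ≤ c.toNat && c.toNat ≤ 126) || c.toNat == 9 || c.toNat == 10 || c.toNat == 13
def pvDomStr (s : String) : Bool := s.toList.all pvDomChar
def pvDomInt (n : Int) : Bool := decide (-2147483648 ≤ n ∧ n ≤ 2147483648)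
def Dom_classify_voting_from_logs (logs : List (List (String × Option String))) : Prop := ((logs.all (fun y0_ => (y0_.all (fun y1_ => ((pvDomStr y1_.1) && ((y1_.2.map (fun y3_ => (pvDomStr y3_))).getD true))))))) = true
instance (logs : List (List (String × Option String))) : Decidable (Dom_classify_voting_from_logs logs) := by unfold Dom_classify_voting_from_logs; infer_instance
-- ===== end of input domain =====

-- B replaces A's flag accumulation and early-exit branch ladder by an arithmetic
-- reduction: each log is scored with a priority rank, the minimum rank is taken over
-- the list, and the answer is one table lookup on that minimum (objective: alternative).

-- ===== PORT A =====
-- ev = (log.get("event") or "").lower()   — appears verbatim in both Pythons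
def pvEvent (log : List (String × Option String)) : String :=
  PySem.Str.lower ((((PySem.Dict.mk log).get? "event").join).getD "")

-- A's for-loop, carrying the has_vote / has_reset flags, early return on claims
def pvLoopA : List (List (String × Option String)) → Bool → Bool → Option String
  | [], hv, hr =>
      if hv then some "VOTE" else if hr then some "RESET_VOTE" else none
  | log :: rest, hv, hr =>
      let ev := pvEvent log
      if ev = "claimbribe" ∨ ev = "claimfees" then some "CLAIM_REWARD"
      else if ev = "vote" then pvLoopA rest true hr
      else if ev = "reset" then pvLoopA rest hv true
      else pvLoopA rest hv hr

def classify_voting_from_logs (logs : List (List (String × Option String))) : Option String :=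
  pvLoopA logs false false

-- ===== PORT B =====
-- RANK and LABEL, the module-level tables of Source B
def pvRANK : PySem.Dict String Int :=
  PySem.Dict.mk [("claimbribe", 0), ("claimfees", 0), ("vote", 1), ("reset", 2)]
def pvLABEL : PySem.Dict Int String :=
  PySem.Dict.mk [(0, "CLAIM_REWARD"), (1, "VOTE"), (2, "RESET_VOTE")]

-- min(generator, default=3): a fold of `min` starting at the default over the scored logs
def classify_voting_from_logs_alt (logs : List (List (String × Option String))) : Option String :=
  let best : Int := logs.foldl (fun a log => min a (pvRANK.getD (pvEvent log) 3)) 3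
  pvLABEL.get? best

-- ===== PRECONDITION & SPEC =====
def Spec_classify_voting_from_logs (logs : List (List (String × Option String))) (out : Option String) : Prop := out = classify_voting_from_logs_alt logs
instance (logs : List (List (String × Option String))) (out : Option String) : Decidable (Spec_classify_voting_from_logs logs out) := by unfold Spec_classify_voting_from_logs; infer_instance

-- ===== CLAIM (what is proved, stated in full; the proofs are below) =====
def Claim_equal_classify_voting_from_logs : Prop := ∀ (logs : List (List (String × Option String))), Dom_classify_voting_from_logs logs → Spec_classify_voting_from_logs logs (classify_voting_from_logs logs)

-- ===== LEMMAS AND PROOFS =====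

-- the rank table as a branch cascade
theorem pvRANK_getD (ev : String) :
    pvRANK.getD ev 3 =
      if ev = "claimbribe" then 0 else if ev = "claimfees" then 0
      else if ev = "vote" then 1 else if ev = "reset" then 2 else (3 : Int) := by
  by_cases h1 : ev = "claimbribe"
  · subst h1; decide
  · by_cases h2 : ev = "claimfees"
    · subst h2; decide
    · by_cases h3 : ev = "vote"
      · subst h3; decide
      · by_cases h4 : ev = "reset"
        · subst h4; decide
        · rw [if_neg h1, if_neg h2, if_neg h3, if_neg h4]
          have b1 : ("claimbribe" == ev) = false := beq_eq_false_iff_ne.mpr (Ne.symm h1)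
          have b2 : ("claimfees" == ev) = false := beq_eq_false_iff_ne.mpr (Ne.symm h2)
          have b3 : ("vote" == ev) = false := beq_eq_false_iff_ne.mpr (Ne.symm h3)
          have b4 : ("reset" == ev) = false := beq_eq_false_iff_ne.mpr (Ne.symm h4)
          rw [pvRANK, PySem.Dict.getD_eq_get?_getD,
              PySem.Dict.get?_mk_cons, b1, PySem.Dict.get?_mk_cons, b2,
              PySem.Dict.get?_mk_cons, b3, PySem.Dict.get?_mk_cons, b4]
          simp only [Bool.false_eq_true, if_false]
          rfl

-- the rank a pair of flags encodes
def pvFlagRank (hv hr : Bool) : Int := if hv then 1 else if hr then 2 else 3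

-- starting rank 0 (a claim seen) is absorbing for the min-fold
theorem pvFold_zero (xs : List (List (String × Option String))) :
    xs.foldl (fun a log => min a (pvRANK.getD (pvEvent log) 3)) 0 = 0 := by
  induction xs with
  | nil => rfl
  | cons y ys ihy =>
      have hx : (0:Int) ≤ pvRANK.getD (pvEvent y) 3 := by
        rw [pvRANK_getD]; split_ifs <;> norm_num
      rw [List.foldl_cons, min_eq_left hx]
      exact ihy

-- A's loop computes the label of the minimum of the flag rank and the logs' ranks
theorem pvLoopA_eq_min (logs : List (List (String × Option String))) (hv hr : Bool) :
    pvLoopA logs hv hr =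
      pvLABEL.get? (logs.foldl (fun a log => min a (pvRANK.getD (pvEvent log) 3)) (pvFlagRank hv hr)) := by
  induction logs generalizing hv hr with
  | nil =>
      cases hv <;> cases hr <;> simp [pvLoopA, pvFlagRank] <;> decide
  | cons log rest ih =>
      simp only [pvLoopA, List.foldl_cons]
      rw [pvRANK_getD (pvEvent log)]
      by_cases h1 : pvEvent log = "claimbribe" ∨ pvEvent log = "claimfees"
      · have hrank : (if pvEvent log = "claimbribe" then (0:Int) else if pvEvent log = "claimfees" then 0
            else if pvEvent log = "vote" then 1 else if pvEvent log = "reset" then 2 else 3) = 0 := by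
          rcases h1 with h | h <;> simp [h]
        have hmin : min (pvFlagRank hv hr) (0:Int) = 0 := by
          cases hv <;> cases hr <;> simp [pvFlagRank]
        rw [if_pos h1, hrank, hmin, pvFold_zero]
        decide
      · have n1 : ¬ pvEvent log = "claimbribe" := fun h => h1 (Or.inl h)
        have n2 : ¬ pvEvent log = "claimfees" := fun h => h1 (Or.inr h)
        rw [if_neg h1]
        by_cases h3 : pvEvent log = "vote"
        · have hrank : (if pvEvent log = "claimbribe" then (0:Int) else if pvEvent log = "claimfees" then 0
              else if pvEvent log = "vote" then 1 else if pvEvent log = "reset" then 2 else 3) = 1 := by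
            simp [n1, n2, h3]
          have hmin : min (pvFlagRank hv hr) (1:Int) = pvFlagRank true hr := by
            cases hv <;> cases hr <;> simp [pvFlagRank]
          rw [if_pos h3, hrank, hmin]
          exact ih true hr
        · by_cases h4 : pvEvent log = "reset"
          · have hrank : (if pvEvent log = "claimbribe" then (0:Int) else if pvEvent log = "claimfees" then 0
                else if pvEvent log = "vote" then 1 else if pvEvent log = "reset" then 2 else 3) = 2 := by
              simp [n1, n2, h3, h4]
            have hmin : min (pvFlagRank hv hr) (2:Int) = pvFlagRank hv true := by
              cases hv <;> cases hr <;> simp [pvFlagRank]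
            rw [if_neg h3, if_pos h4, hrank, hmin]
            exact ih hv true
          · have hrank : (if pvEvent log = "claimbribe" then (0:Int) else if pvEvent log = "claimfees" then 0
                else if pvEvent log = "vote" then 1 else if pvEvent log = "reset" then 2 else 3) = 3 := by
              simp [n1, n2, h3, h4]
            have hmin : min (pvFlagRank hv hr) (3:Int) = pvFlagRank hv hr := by
              cases hv <;> cases hr <;> simp [pvFlagRank]
            rw [if_neg h3, if_neg h4, hrank, hmin]
            exact ih hv hr

-- ===== VERDICT (by name: the statement is the Claim_ definition above) =====
theorem classify_voting_from_logs_spec : Claim_equal_classify_voting_from_logs := by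
  intro logs _
  unfold Spec_classify_voting_from_logs classify_voting_from_logs classify_voting_from_logs_alt
  rw [pvLoopA_eq_min]
  rfl
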